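-- pv_equiv track=rewrite | github.com/yuanzheng-wang/code | final_experiment_slashdot.py | BINdist
-- ===== SOURCE A (Python) =====
-- def BINdist(A, B, r):
--     if len(A) == 0 or len(B) == 0:
--         return 10000
--     L = []
--     inc = [1, -1]
--     for i in A:
--         L.append([i-r, 0])
--         L.append([i+r, 1])
--     for i in B:
--         L.append([i-r, 1])
--         L.append([i+r, 0])
--     L.sort()
--     x = 0
--     pre = 0
--     ans = 0
--     for pair in L:
--         ans += abs(x)*(pair[0]-pre)
--         x += inc[pair[1]]
--         pre = pair[0]
--     return ans
-- ===== SOURCE B (Python) =====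
-- def BINdist(A, B, r):
--     if len(A) == 0 or len(B) == 0:
--         return 10000
--     As = sorted(A)
--     Bs = sorted(B)
--
--     def le_count(xs, v):
--         # number of elements of the sorted list xs that are <= v (binary search)
--         lo, hi = 0, len(xs)
--         while lo < hi:
--             mid = (lo + hi) // 2
--             if xs[mid] <= v:
--                 lo = mid + 1
--             else:
--                 hi = mid
--         return lo
--
--     coords = sorted({c for x in A + B for c in (x - r, x + r)})
--     ans = 0
--     for c, d in zip(coords, coords[1:]):
--         # coverage counter on the segment [c, d), computed independently
--         # by binary-search counting queries on the two sorted inputs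
--         x = (le_count(As, c + r) - le_count(As, c - r)
--              - le_count(Bs, c + r) + le_count(Bs, c - r))
--         ans += abs(x) * (d - c)
--     return ans
-- ===== Notes on version B (the rewrite author's own statement) =====
-- stated objective: alternative
-- what changed: Instead of A's incremental sweep (sort 4n tagged endpoint events and maintain a running counter), B sorts the two input lists once and, for each gap between consecutive distinct endpoint coordinates, computes the coverage counter independently with four binary-search counting queries (#elements <= v) on the sorted inputs; no event list and no running state are kept.
import Mathlib
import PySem

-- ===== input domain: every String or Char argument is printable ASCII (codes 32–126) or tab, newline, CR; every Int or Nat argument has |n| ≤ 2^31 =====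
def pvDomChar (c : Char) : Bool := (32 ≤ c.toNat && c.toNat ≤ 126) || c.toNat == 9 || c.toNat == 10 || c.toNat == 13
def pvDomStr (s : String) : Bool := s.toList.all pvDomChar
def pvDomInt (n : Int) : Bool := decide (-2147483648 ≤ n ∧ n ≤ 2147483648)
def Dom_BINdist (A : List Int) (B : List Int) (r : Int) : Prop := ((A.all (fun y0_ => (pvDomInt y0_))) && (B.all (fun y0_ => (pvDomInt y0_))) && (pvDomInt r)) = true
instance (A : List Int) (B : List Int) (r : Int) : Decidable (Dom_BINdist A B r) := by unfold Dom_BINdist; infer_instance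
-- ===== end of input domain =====

-- B replaces A's incremental event sweep (sort 4n tagged endpoints, run a counter) by sorting
-- the two inputs once and computing the coverage counter of each gap between consecutive
-- distinct endpoint coordinates independently, with four binary-search counting queries;
-- same O(n log n) cost (objective: alternative); return values agree on every input.

-- ===== PORT A =====
-- Literal port of A.  Python's inner 2-lists [coord, tag] stay List Int, sorted
-- lexicographically (Lean's lex order on List Int = Python's on same-length int lists).
-- pair[0], pair[1] and inc[pair[1]] are PySem.List.pyGetD with default 0: every pair built
-- has length 2 and tag 0 or 1, so the index is always in range and Python never raises.
def BINdist (A : List Int) (B : List Int) (r : Int) : Int :=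
  if A.length = 0 ∨ B.length = 0 then 10000
  else
    let inc : List Int := [1, -1]
    let L1 : List (List Int) := A.foldl (fun L i => (L ++ [[i - r, 0]]) ++ [[i + r, 1]]) []
    let L2 : List (List Int) := B.foldl (fun L i => (L ++ [[i - r, 1]]) ++ [[i + r, 0]]) L1
    let Ls : List (List Int) := PySem.List.sorted L2 (fun p => p)
    let s : Int × Int × Int := Ls.foldl (fun (s : Int × Int × Int) pair =>
      (s.1 + PySem.List.pyGetD inc (PySem.List.pyGetD pair 1 0) 0,
       PySem.List.pyGetD pair 0 0,
       s.2.2 + |s.1| * (PySem.List.pyGetD pair 0 0 - s.2.1))) (0, 0, 0)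
    s.2.2

-- ===== PORT B =====
-- le_count's while loop: lo, hi are nonnegative Python ints with 0 ≤ lo ≤ hi ≤ len(xs),
-- so they are ported as Nat; mid = (lo+hi)//2 is Nat division (= Python // on nonnegatives)
-- and xs[mid] (always in range, mid < hi ≤ len) is List.getD.
def pvLeLoop (xs : List Int) (v : Int) (lo hi : Nat) : Nat :=
  if lo < hi then
    let mid := (lo + hi) / 2
    if xs.getD mid 0 ≤ v then pvLeLoop xs v (mid + 1) hi else pvLeLoop xs v lo mid
  else lo
termination_by hi - lo
decreasing_by all_goals omega

def pvLeCount (xs : List Int) (v : Int) : Int := (pvLeLoop xs v 0 xs.length : Int)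

-- Literal port of B (Source B).  The set comprehension over A + B is PySem.Set.ofList of the
-- generated coordinate list; zip(coords, coords[1:]) is List.zip with slice [1:].
def BINdist_alt (A : List Int) (B : List Int) (r : Int) : Int :=
  if A.length = 0 ∨ B.length = 0 then 10000
  else
    let As : List Int := PySem.List.sorted A (fun x => x)
    let Bs : List Int := PySem.List.sorted B (fun x => x)
    let coords : List Int := PySem.List.sorted
      (PySem.Set.ofList ((A ++ B).flatMap (fun x => [x - r, x + r]))) (fun c => c)
    (coords.zip (PySem.List.slice coords (some 1) none)).foldl (fun ans p =>
      ans + |pvLeCount As (p.1 + r) - pvLeCount As (p.1 - r)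
              - pvLeCount Bs (p.1 + r) + pvLeCount Bs (p.1 - r)| * (p.2 - p.1)) 0

-- ===== PRECONDITION & SPEC =====
def Spec_BINdist (A : List Int) (B : List Int) (r : Int) (out : Int) : Prop := out = BINdist_alt A B r
instance (A : List Int) (B : List Int) (r : Int) (out : Int) : Decidable (Spec_BINdist A B r out) := by unfold Spec_BINdist; infer_instance

-- ===== CLAIM (what is proved, stated in full; the proofs are below) =====
def Claim_equal_BINdist : Prop := ∀ (A : List Int) (B : List Int) (r : Int), Dom_BINdist A B r → Spec_BINdist A B r (BINdist A B r)

-- ===== LEMMAS AND PROOFS =====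

-- A's sweep step: state (x, pre, ans), event (coord, delta).
def pvStep (s : Int × Int × Int) (p : Int × Int) : Int × Int × Int :=
  (s.1 + p.2, p.1, s.2.2 + |s.1| * (p.1 - s.2.1))

-- Net increment at coordinate c of an event list.
def pvNet (E : List (Int × Int)) (c : Int) : Int :=
  ((E.filter (fun p => p.1 == c)).map (·.2)).sum

-- A's event stream: (coordinate, ±1).
def pvEvents (A : List Int) (B : List Int) (r : Int) : List (Int × Int) :=
  A.flatMap (fun a => [(a - r, 1), (a + r, -1)]) ++ B.flatMap (fun b => [(b - r, -1), (b + r, 1)])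

-- Canonical collapsed sweep list: sorted distinct coordinates with their net increments.
def pvCanon (E : List (Int × Int)) : List (Int × Int) :=
  (PySem.List.sorted (PySem.Set.ofList (E.map (·.1))) (fun c => c)).map (fun c => (c, pvNet E c))

-- Merge consecutive equal-coordinate events into one.
def pvCollapse : List (Int × Int) → List (Int × Int)
  | [] => []
  | (c, d) :: t =>
      (c, d + ((t.takeWhile (fun p => p.1 == c)).map (·.2)).sum) ::
        pvCollapse (t.dropWhile (fun p => p.1 == c))
termination_by l => l.length
decreasing_by
  simpa using Nat.lt_succ_of_le (List.length_dropWhile_le _ _)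

lemma pvNet_cons (p : Int × Int) (t : List (Int × Int)) (c : Int) :
    pvNet (p :: t) c = (if p.1 = c then p.2 else 0) + pvNet t c := by
  by_cases h : p.1 = c <;> simp [pvNet, h]

lemma pvNet_append (l1 l2 : List (Int × Int)) (c : Int) :
    pvNet (l1 ++ l2) c = pvNet l1 c + pvNet l2 c := by
  simp [pvNet]

lemma pvNet_eq_zero_of_forall_ne (l : List (Int × Int)) (c : Int)
    (h : ∀ p ∈ l, p.1 ≠ c) : pvNet l c = 0 := by
  have : l.filter (fun p => p.1 == c) = [] := by
    apply List.filter_eq_nil_iff.mpr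
    intro p hp
    simp [h p hp]
  simp [pvNet, this]

lemma pvNet_eq_sum_of_forall_eq (l : List (Int × Int)) (c : Int)
    (h : ∀ p ∈ l, p.1 = c) : pvNet l c = (l.map (·.2)).sum := by
  have : l.filter (fun p => p.1 == c) = l := by
    apply List.filter_eq_self.mpr
    intro p hp
    simp [h p hp]
  simp [pvNet, this]

lemma pvNet_of_perm {P E : List (Int × Int)} (h : P.Perm E) (c : Int) :
    pvNet P c = pvNet E c := by
  unfold pvNet
  exact List.Perm.sum_eq (List.Perm.map _ (List.Perm.filter _ h))

-- A run of events all at coordinate c, started at pre = c, only accumulates the counter.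
lemma pvFoldl_step_const (c : Int) :
    ∀ (tw : List (Int × Int)), (∀ p ∈ tw, p.1 = c) → ∀ (x a : Int),
      tw.foldl pvStep (x, c, a) = (x + (tw.map (·.2)).sum, c, a) := by
  intro tw
  induction tw with
  | nil => intro _ x a; simp
  | cons p t ih =>
    intro h x a
    have hc : p.1 = c := h p (by simp)
    have hstep : pvStep (x, c, a) p = (x + p.2, c, a) := by
      simp [pvStep, hc]
    rw [List.foldl_cons, hstep, ih (fun q hq => h q (by simp [hq]))]
    simp [add_assoc]

-- Collapsing consecutive equal coordinates does not change the sweep.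
lemma pvFoldl_step_collapse (P : List (Int × Int)) :
    ∀ s, (pvCollapse P).foldl pvStep s = P.foldl pvStep s := by
  fun_induction pvCollapse P with
  | case1 => intro s; rfl
  | case2 c d t ih =>
    intro s
    have htw : ∀ p ∈ t.takeWhile (fun p => p.1 == c), p.1 = c := by
      intro p hp
      simpa using List.mem_takeWhile_imp hp
    have hsplit : t.takeWhile (fun p => p.1 == c) ++ t.dropWhile (fun p => p.1 == c) = t :=
      List.takeWhile_append_dropWhile
    calc ((c, d + ((t.takeWhile (fun p => p.1 == c)).map (·.2)).sum) ::
            pvCollapse (t.dropWhile (fun p => p.1 == c))).foldl pvStep s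
        = (pvCollapse (t.dropWhile (fun p => p.1 == c))).foldl pvStep
            (s.1 + (d + ((t.takeWhile (fun p => p.1 == c)).map (·.2)).sum), c,
             s.2.2 + |s.1| * (c - s.2.1)) := rfl
      _ = (t.dropWhile (fun p => p.1 == c)).foldl pvStep
            (s.1 + (d + ((t.takeWhile (fun p => p.1 == c)).map (·.2)).sum), c,
             s.2.2 + |s.1| * (c - s.2.1)) := ih _
      _ = ((c, d) :: t).foldl pvStep s := by
          have hstep : pvStep s (c, d) = (s.1 + d, c, s.2.2 + |s.1| * (c - s.2.1)) := rfl
          conv_rhs => rw [List.foldl_cons, hstep, ← hsplit, List.foldl_append,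
            pvFoldl_step_const c _ htw]
          rw [← add_assoc]

-- Every coordinate of the collapsed list is a coordinate of the original.
lemma pvCollapse_fst_mem (P : List (Int × Int)) :
    ∀ q ∈ pvCollapse P, q.1 ∈ P.map (·.1) := by
  fun_induction pvCollapse P with
  | case1 => intro q hq; simp at hq
  | case2 c d t ih =>
    intro q hq
    rcases (List.mem_cons).mp hq with h | h
    · subst h; simp
    · have h1 := ih q h
      have hsub : (t.dropWhile (fun p => p.1 == c)).Sublist t := List.dropWhile_sublist _
      have : q.1 ∈ t.map (·.1) := (hsub.map (·.1)).subset h1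
      simp [this]

-- Facts about the head group under sortedness: everything after the group is strictly larger.
lemma pvDropWhile_gt (c : Int) (t : List (Int × Int))
    (hsorted : t.Pairwise (fun p q => p.1 ≤ q.1))
    (hge : ∀ p ∈ t, c ≤ p.1) :
    ∀ p ∈ t.dropWhile (fun p => p.1 == c), c < p.1 := by
  intro p hp
  cases hdr : t.dropWhile (fun p => p.1 == c) with
  | nil => rw [hdr] at hp; simp at hp
  | cons q0 dr' =>
    have hq0ne : ¬ (q0.1 == c) = true := by
      have := List.head?_dropWhile_not (p := fun p => p.1 == c) (l := t)
      rw [hdr] at this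
      simpa using this
    have hq0 : c < q0.1 := by
      have hq0t : q0 ∈ t := (List.dropWhile_sublist _).subset (by rw [hdr]; simp)
      have := hge q0 hq0t
      simp at hq0ne
      omega
    rw [hdr] at hp
    rcases List.mem_cons.mp hp with h | h
    · subst h; exact hq0
    · have hdsub : (t.dropWhile (fun p => p.1 == c)).Pairwise (fun p q => p.1 ≤ q.1) :=
        hsorted.sublist (List.dropWhile_sublist _)
      rw [hdr] at hdsub
      have := (List.pairwise_cons.mp hdsub).1 p h
      omega

-- Under sortedness, the collapsed list is strictly increasing in coordinate.
lemma pvCollapse_pairwise (P : List (Int × Int)) :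
    P.Pairwise (fun p q => p.1 ≤ q.1) → (pvCollapse P).Pairwise (fun p q => p.1 < q.1) := by
  fun_induction pvCollapse P with
  | case1 => intro _; simp
  | case2 c d t ih =>
    intro hP
    have ht : t.Pairwise (fun p q => p.1 ≤ q.1) := (List.pairwise_cons.mp hP).2
    have hge : ∀ p ∈ t, c ≤ p.1 := fun p hp => (List.pairwise_cons.mp hP).1 p hp
    have hgt := pvDropWhile_gt c t ht hge
    refine List.pairwise_cons.mpr ⟨?_, ih (ht.sublist (List.dropWhile_sublist _))⟩
    intro q hq
    have := pvCollapse_fst_mem _ q hq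
    rcases List.mem_map.mp this with ⟨p, hp, hpq⟩
    have := hgt p hp
    simpa [hpq] using this

-- Under sortedness, membership in the collapsed list is exactly (coordinate, its net).
lemma pvMem_collapse (P : List (Int × Int)) :
    P.Pairwise (fun p q => p.1 ≤ q.1) → ∀ (c v : Int),
      ((c, v) ∈ pvCollapse P ↔ c ∈ P.map (·.1) ∧ v = pvNet P c) := by
  fun_induction pvCollapse P with
  | case1 => intro _ c v; simp [pvNet]
  | case2 c0 d t ih =>
    intro hP c v
    have ht : t.Pairwise (fun p q => p.1 ≤ q.1) := (List.pairwise_cons.mp hP).2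
    have hge : ∀ p ∈ t, c0 ≤ p.1 := fun p hp => (List.pairwise_cons.mp hP).1 p hp
    have hgt := pvDropWhile_gt c0 t ht hge
    have htw : ∀ p ∈ t.takeWhile (fun p => p.1 == c0), p.1 = c0 := by
      intro p hp; simpa using List.mem_takeWhile_imp hp
    have hsplit : t.takeWhile (fun p => p.1 == c0) ++ t.dropWhile (fun p => p.1 == c0) = t :=
      List.takeWhile_append_dropWhile
    have hnetP : ∀ x : Int, pvNet ((c0, d) :: t) x =
        (if c0 = x then d else 0) + pvNet (t.takeWhile (fun p => p.1 == c0)) x +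
          pvNet (t.dropWhile (fun p => p.1 == c0)) x := by
      intro x
      rw [pvNet_cons]
      conv_lhs => rw [← hsplit]
      rw [pvNet_append]
      by_cases h : c0 = x
      · simp [h]
        ring
      · simp [h]
    by_cases hc : c = c0
    · subst hc
      have hdr0 : pvNet (t.dropWhile (fun p => p.1 == c)) c = 0 :=
        pvNet_eq_zero_of_forall_ne _ _ (fun p hp => by have := hgt p hp; omega)
      have hnotdr : (c, v) ∉ pvCollapse (t.dropWhile (fun p => p.1 == c)) := by
        intro hmem
        have := pvCollapse_fst_mem _ _ hmem
        rcases List.mem_map.mp this with ⟨p, hp, hpq⟩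
        have := hgt p hp
        simp at hpq
        omega
      constructor
      · intro hmem
        rcases List.mem_cons.mp hmem with h | h
        · have hv : v = d + ((t.takeWhile (fun p => p.1 == c)).map (·.2)).sum := by
            have := congrArg Prod.snd h; simpa using this
          refine ⟨by simp, ?_⟩
          rw [hnetP c, hdr0, pvNet_eq_sum_of_forall_eq _ _ htw]
          simp [hv]
        · exact absurd h hnotdr
      · intro ⟨_, hv⟩
        have : v = d + ((t.takeWhile (fun p => p.1 == c)).map (·.2)).sum := by
          rw [hnetP c, hdr0, pvNet_eq_sum_of_forall_eq _ _ htw] at hv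
          simp at hv
          omega
        simp [this]
    · have htw0 : pvNet (t.takeWhile (fun p => p.1 == c0)) c = 0 :=
        pvNet_eq_zero_of_forall_ne _ _ (fun p hp => by rw [htw p hp]; omega)
      have hnet : pvNet ((c0, d) :: t) c = pvNet (t.dropWhile (fun p => p.1 == c0)) c := by
        rw [hnetP c, htw0]
        simp [Ne.symm hc]
      have hmapfst : c ∈ ((c0, d) :: t).map (·.1) ↔
          c ∈ (t.dropWhile (fun p => p.1 == c0)).map (·.1) := by
        constructor
        · intro h
          have h' : c = c0 ∨ c ∈ t.map (·.1) := by simpa using h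
          rcases h' with h' | h'
          · exact absurd h' hc
          · rw [← hsplit, List.map_append] at h'
            rcases List.mem_append.mp h' with h'' | h''
            · rcases List.mem_map.mp h'' with ⟨p, hp, hpc⟩
              exact absurd (by rw [← hpc]; exact htw p hp) hc
            · exact h''
        · intro h
          have hsub : (t.dropWhile (fun p => p.1 == c0)).Sublist t :=
            List.dropWhile_sublist _
          have : c ∈ t.map (·.1) := (hsub.map (·.1)).subset h
          simp [this]
      have hdw : (t.dropWhile (fun p => p.1 == c0)).Pairwise (fun p q => p.1 ≤ q.1) :=
        ht.sublist (List.dropWhile_sublist _)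
      constructor
      · intro hmem
        rcases List.mem_cons.mp hmem with h | h
        · have := congrArg Prod.fst h; simp at this; exact absurd this hc
        · have := (ih hdw c v).mp h
          exact ⟨hmapfst.mpr this.1, by rw [hnet]; exact this.2⟩
      · intro ⟨hm, hv⟩
        have := (ih hdw c v).mpr ⟨hmapfst.mp hm, by rw [← hnet]; exact hv⟩
        exact List.mem_cons.mpr (Or.inr this)

-- pvCanon: membership and strict sortedness.
lemma pvMem_canon (E : List (Int × Int)) (c v : Int) :
    (c, v) ∈ pvCanon E ↔ c ∈ E.map (·.1) ∧ v = pvNet E c := by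
  unfold pvCanon
  constructor
  · intro h
    rcases List.mem_map.mp h with ⟨c', hc', heq⟩
    have hc1 : c' = c := by have := congrArg Prod.fst heq; simpa using this
    have hv : v = pvNet E c := by
      have := congrArg Prod.snd heq; subst hc1; simpa using this.symm
    subst hc1
    refine ⟨?_, hv⟩
    have := (PySem.List.mem_sorted _ _ _ _).mp hc'
    exact (PySem.Set.mem_ofList _ _).mp this
  · intro ⟨hm, hv⟩
    subst hv
    refine List.mem_map.mpr ⟨c, ?_, rfl⟩
    exact (PySem.List.mem_sorted _ _ _ _).mpr ((PySem.Set.mem_ofList _ _).mpr hm)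

lemma pvCanon_pairwise (E : List (Int × Int)) :
    (pvCanon E).Pairwise (fun p q => p.1 < q.1) := by
  unfold pvCanon
  rw [List.pairwise_map]
  simpa using PySem.List.sorted_ofList_pairwise_lt (E.map (·.1))

lemma pvPairwise_lt_nodup (l : List (Int × Int)) (h : l.Pairwise (fun p q => p.1 < q.1)) :
    l.Nodup :=
  h.imp (fun hpq => by intro he; rw [he] at hpq; omega)

-- MAIN uniqueness: a sorted permutation of E collapses to pvCanon E.
lemma pvCollapse_eq_canon (P E : List (Int × Int)) (hperm : P.Perm E)
    (hsorted : P.Pairwise (fun p q => p.1 ≤ q.1)) : pvCollapse P = pvCanon E := by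
  have hmem : ∀ q : Int × Int, q ∈ pvCollapse P ↔ q ∈ pvCanon E := by
    intro ⟨c, v⟩
    rw [pvMem_collapse P hsorted c v, pvMem_canon E c v,
      pvNet_of_perm hperm, (hperm.map (·.1)).mem_iff]
  have hpwP := pvCollapse_pairwise P hsorted
  have hpwC := pvCanon_pairwise E
  have hpermPC : (pvCollapse P).Perm (pvCanon E) :=
    (List.perm_ext_iff_of_nodup (pvPairwise_lt_nodup _ hpwP)
      (pvPairwise_lt_nodup _ hpwC)).mpr hmem
  have h1 : PySem.List.sorted (pvCanon E) (fun p => p.1) = pvCollapse P :=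
    PySem.List.sorted_eq_of_perm_of_pairwise_lt _ _ _ hpermPC hpwP
  have h2 : PySem.List.sorted (pvCanon E) (fun p => p.1) = pvCanon E :=
    PySem.List.sorted_eq_of_perm_of_pairwise_lt _ _ _ (List.Perm.refl _) hpwC
  rw [← h1, h2]

-- ---------- A-side bridge ----------

def pvGA (pair : List Int) : Int × Int :=
  (PySem.List.pyGetD pair 0 0, PySem.List.pyGetD [1, -1] (PySem.List.pyGetD pair 1 0) 0)

lemma pvGA_pair (c t : Int) : pvGA [c, t] = (c, PySem.List.pyGetD [1, -1] t 0) := by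
  simp [pvGA, PySem.List.pyGetD, PySem.List.pyGet?, PySem.List.pyIdx?]

lemma pvGA_zero (c : Int) : pvGA [c, 0] = (c, 1) := by
  rw [pvGA_pair]
  norm_num [PySem.List.pyGetD, PySem.List.pyGet?, PySem.List.pyIdx?]

lemma pvGA_one (c : Int) : pvGA [c, 1] = (c, -1) := by
  rw [pvGA_pair]
  norm_num [PySem.List.pyGetD, PySem.List.pyGet?, PySem.List.pyIdx?]

-- The Python list L (after both build loops) as a flatMap.
def pvLA (A B : List Int) (r : Int) : List (List Int) :=
  A.flatMap (fun a => [[a - r, 0], [a + r, 1]]) ++ B.flatMap (fun b => [[b - r, 1], [b + r, 0]])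

lemma pvBuildA (A : List Int) (r : Int) :
    ∀ acc : List (List Int),
      A.foldl (fun L i => (L ++ [[i - r, 0]]) ++ [[i + r, 1]]) acc =
        acc ++ A.flatMap (fun a => [[a - r, 0], [a + r, 1]]) := by
  induction A with
  | nil => intro acc; simp
  | cons a t _ => intro acc; simp [List.flatMap_def]

lemma pvBuildB (B : List Int) (r : Int) :
    ∀ acc : List (List Int),
      B.foldl (fun L i => (L ++ [[i - r, 1]]) ++ [[i + r, 0]]) acc =
        acc ++ B.flatMap (fun b => [[b - r, 1], [b + r, 0]]) := by
  induction B with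
  | nil => intro acc; simp
  | cons b t _ => intro acc; simp [List.flatMap_def]

lemma pvMapGA_LA (A B : List Int) (r : Int) :
    (pvLA A B r).map pvGA = pvEvents A B r := by
  unfold pvLA pvEvents
  rw [List.map_append, List.map_flatMap, List.map_flatMap]
  simp only [List.map_cons, List.map_nil, pvGA_zero, pvGA_one]

-- Shape: every element of L is a 2-list.
lemma pvLA_shape (A B : List Int) (r : Int) :
    ∀ p ∈ pvLA A B r, ∃ c t : Int, p = [c, t] := by
  intro p hp
  unfold pvLA at hp
  rcases List.mem_append.mp hp with h | h
  · rcases List.mem_flatMap.mp h with ⟨x, _, hx⟩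
    simp only [List.mem_cons, List.not_mem_nil, or_false] at hx
    rcases hx with h' | h'
    · exact ⟨_, _, h'⟩
    · exact ⟨_, _, h'⟩
  · rcases List.mem_flatMap.mp h with ⟨x, _, hx⟩
    simp only [List.mem_cons, List.not_mem_nil, or_false] at hx
    rcases hx with h' | h'
    · exact ⟨_, _, h'⟩
    · exact ⟨_, _, h'⟩

lemma pvLex_le_fst (c1 t1 c2 t2 : Int) (h : ([c1, t1] : List Int) ≤ [c2, t2]) : c1 ≤ c2 := by
  rcases le_or_gt c1 c2 with h' | h'
  · exact h'
  · exact absurd (List.Lex.rel h' : ([c2, t2] : List Int) < [c1, t1]) (not_lt.mpr h)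

-- The ambient LT/DecidableLT instances on List Int picked by elaboration differ from the
-- LinearOrder-derived ones PySem's order lemmas are stated with; they decide the same
-- relation, so the two sorted calls are equal.
lemma pvSorted_inst (xs : List (List Int)) :
    @PySem.List.sorted (List Int) (List Int) List.instLT (fun a b => a.decidableLT b)
        xs (fun p => p) false =
      @PySem.List.sorted (List Int) (List Int) List.instLinearOrder.toLT
        LinearOrder.toDecidableLT xs (fun p => p) false := by
  have hfun : (fun (a b : List Int) => @decide (@LT.lt _ List.instLT a b) (a.decidableLT b)) =
      (fun (a b : List Int) =>
        @decide (@LT.lt _ List.instLinearOrder.toLT a b) (LinearOrder.toDecidableLT a b)) := by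
    funext a b
    exact decide_eq_decide.mpr Iff.rfl
  unfold PySem.List.sorted
  simp only [Bool.false_eq_true, if_false]
  rw [hfun]

-- The mapped, sorted event list is sorted by coordinate.
lemma pvSortedLA_pairwise (A B : List Int) (r : Int) :
    ((PySem.List.sorted (pvLA A B r) (fun p => p)).map pvGA).Pairwise
      (fun p q => p.1 ≤ q.1) := by
  have hpw := PySem.List.sorted_pairwise (pvLA A B r) (fun p => p)
  rw [← pvSorted_inst] at hpw
  rw [List.pairwise_map]
  refine List.Pairwise.imp_of_mem (fun {p} {q} hp hq hle => ?_) hpw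
  have hp' := (PySem.List.mem_sorted _ _ _ _).mp hp
  have hq' := (PySem.List.mem_sorted _ _ _ _).mp hq
  rcases pvLA_shape A B r p hp' with ⟨c1, t1, rfl⟩
  rcases pvLA_shape A B r q hq' with ⟨c2, t2, rfl⟩
  have hc := pvLex_le_fst c1 t1 c2 t2 hle
  rw [pvGA_pair, pvGA_pair]
  simpa using hc

-- A's sweep equals the canonical sweep.
lemma pvA_eq_canon (A B : List Int) (r : Int) :
    ((PySem.List.sorted (pvLA A B r) (fun p => p)).map pvGA).foldl pvStep (0, 0, 0) =
      (pvCanon (pvEvents A B r)).foldl pvStep (0, 0, 0) := by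
  set P := (PySem.List.sorted (pvLA A B r) (fun p => p)).map pvGA with hP
  have hperm : P.Perm (pvEvents A B r) := by
    rw [← pvMapGA_LA A B r]
    exact (PySem.List.sorted_perm _ _ _).map pvGA
  rw [← pvCollapse_eq_canon P (pvEvents A B r) hperm (pvSortedLA_pairwise A B r),
    pvFoldl_step_collapse]

lemma pvFoldlA_eq (L : List (List Int)) (init : Int × Int × Int) :
    L.foldl (fun (s : Int × Int × Int) pair =>
      (s.1 + PySem.List.pyGetD [1, -1] (PySem.List.pyGetD pair 1 0) 0,
       PySem.List.pyGetD pair 0 0,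
       s.2.2 + |s.1| * (PySem.List.pyGetD pair 0 0 - s.2.1))) init =
    (L.map pvGA).foldl pvStep init := by
  rw [List.foldl_map]
  rfl

-- ---------- sweep ↔ gap-sum bridge ----------

-- Cumulative delta of all events at coordinates ≤ c.
def pvCum (E : List (Int × Int)) (c : Int) : Int :=
  (E.map (fun e => if e.1 ≤ c then e.2 else 0)).sum

-- The answer accumulated by the sweep over coordinates cs, starting at counter x, previous pre.
def pvSweep (E : List (Int × Int)) : Int → Int → List Int → Int
  | _, _, [] => 0
  | x, pre, c :: t => |x| * (c - pre) + pvSweep E (x + pvNet E c) c t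

lemma pvFoldl_canon_sweep (E : List (Int × Int)) :
    ∀ (cs : List Int) (x pre a : Int),
      ((cs.map (fun c => (c, pvNet E c))).foldl pvStep (x, pre, a)).2.2 =
        a + pvSweep E x pre cs := by
  intro cs
  induction cs with
  | nil => intro x pre a; simp [pvSweep]
  | cons c t ih =>
    intro x pre a
    simp only [List.map_cons, List.foldl_cons, pvStep, pvSweep]
    rw [ih]
    ring

lemma pvNet_eq_sum_ite (E : List (Int × Int)) (c : Int) :
    pvNet E c = (E.map (fun e => if e.1 = c then e.2 else 0)).sum := by
  induction E with
  | nil => simp [pvNet]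
  | cons e t ih => rw [pvNet_cons, ih]; simp

lemma pvCum_step (E : List (Int × Int)) (p c : Int) (hpc : p < c)
    (hbt : ∀ e ∈ E, ¬(p < e.1 ∧ e.1 < c)) :
    pvCum E c = pvCum E p + pvNet E c := by
  unfold pvCum
  rw [pvNet_eq_sum_ite, ← PySem.List.sum_map_add_int]
  apply congrArg List.sum
  apply List.map_congr_left
  intro e he
  have := hbt e he
  split_ifs <;> omega

lemma pvCum_eq_zero (E : List (Int × Int)) (p : Int) (h : ∀ e ∈ E, ¬ e.1 ≤ p) :
    pvCum E p = 0 := by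
  unfold pvCum
  have : E.map (fun e => if e.1 ≤ p then e.2 else 0) = E.map (fun _ => (0 : Int)) :=
    List.map_congr_left (fun e he => by simp [h e he])
  rw [this]
  simp

-- Main sweep/gap-sum lemma.
lemma pvSweep_eq_gapsum (E : List (Int × Int)) :
    ∀ (cs : List Int) (p pre : Int),
      cs.Pairwise (· < ·) → (∀ m ∈ cs, p < m) → (∀ e ∈ E, e.1 ≤ p ∨ e.1 ∈ cs) →
      pvSweep E (pvCum E p) pre cs =
        (match cs with | [] => 0 | c :: _ => |pvCum E p| * (c - pre)) +
        ((cs.zip cs.tail).map (fun q => |pvCum E q.1| * (q.2 - q.1))).sum := by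
  intro cs
  induction cs with
  | nil => intro p pre _ _ _; simp [pvSweep]
  | cons c t ih =>
    intro p pre hpw hmin hcov
    have hpc : p < c := hmin c (by simp)
    have hcum : pvCum E p + pvNet E c = pvCum E c := by
      have hbt : ∀ e ∈ E, ¬(p < e.1 ∧ e.1 < c) := by
        intro e he hcontra
        rcases hcov e he with h | h
        · omega
        · rcases List.mem_cons.mp h with h' | h'
          · omega
          · have := (List.pairwise_cons.mp hpw).1 e.1 h'
            omega
      rw [pvCum_step E p c hpc hbt]
    have ht : t.Pairwise (· < ·) := (List.pairwise_cons.mp hpw).2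
    have hmint : ∀ m ∈ t, c < m := fun m hm => (List.pairwise_cons.mp hpw).1 m hm
    have hcovt : ∀ e ∈ E, e.1 ≤ c ∨ e.1 ∈ t := by
      intro e he
      rcases hcov e he with h | h
      · left; omega
      · rcases List.mem_cons.mp h with h' | h'
        · left; omega
        · right; exact h'
    have := ih c c ht hmint hcovt
    simp only [pvSweep, hcum]
    rw [this]
    cases t with
    | nil => simp
    | cons d t' => simp

-- ---------- B-side bridge ----------

-- Binary search computes the ≤-count on a sorted list.
lemma pvCountP_split (xs : List Int) (v : Int) (lo : Nat) (hlo : lo ≤ xs.length)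
    (h1 : ∀ i, i < lo → xs.getD i 0 ≤ v)
    (h2 : ∀ i, lo ≤ i → i < xs.length → ¬ xs.getD i 0 ≤ v) :
    xs.countP (fun x => decide (x ≤ v)) = lo := by
  conv_lhs => rw [← List.take_append_drop lo xs]
  rw [List.countP_append]
  have htake : (xs.take lo).countP (fun x => decide (x ≤ v)) = lo := by
    have hall : ∀ x ∈ xs.take lo, decide (x ≤ v) = true := by
      intro x hx
      rcases List.mem_iff_getElem.mp hx with ⟨i, hi, hget⟩
      have hi' : i < lo ∧ i < xs.length := by simpa using hi
      have hilen : i < xs.length := hi'.2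
      have : xs.getD i 0 ≤ v := h1 i hi'.1
      rw [List.getD_eq_getElem xs 0 hilen] at this
      rw [← hget, List.getElem_take]
      simpa using this
    rw [List.countP_eq_length.mpr hall, List.length_take]
    omega
  have hdrop : (xs.drop lo).countP (fun x => decide (x ≤ v)) = 0 := by
    apply List.countP_eq_zero.mpr
    intro x hx
    rcases List.mem_iff_getElem.mp hx with ⟨i, hi, hget⟩
    have hlen : lo + i < xs.length := by
      have := hi; rw [List.length_drop] at this; omega
    have := h2 (lo + i) (by omega) hlen
    rw [List.getD_eq_getElem xs 0 hlen] at this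
    rw [← hget, List.getElem_drop]
    simpa using this
  omega

lemma pvLeLoop_correct (xs : List Int) (v : Int) (hs : xs.Pairwise (· ≤ ·)) :
    ∀ (lo hi : Nat), lo ≤ hi → hi ≤ xs.length →
      (∀ i, i < lo → xs.getD i 0 ≤ v) →
      (∀ i, hi ≤ i → i < xs.length → ¬ xs.getD i 0 ≤ v) →
      pvLeLoop xs v lo hi = xs.countP (fun x => decide (x ≤ v)) := by
  intro lo hi
  fun_induction pvLeLoop xs v lo hi with
  | case1 lo hi hlt mid hmidle ih =>
    intro _ hhi h1 h2
    have hmid : mid < hi := by simp only [mid]; omega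
    apply ih (by omega) hhi ?_ h2
    intro i hi'
    have hilen : i < xs.length := by omega
    by_cases heq : i = mid
    · subst heq; exact hmidle
    · have hlt' : i < mid := by omega
      have hmidlen : mid < xs.length := by omega
      have := (List.pairwise_iff_getElem.mp hs) i mid hilen hmidlen hlt'
      have hmid' := hmidle
      rw [List.getD_eq_getElem xs 0 hmidlen] at hmid'
      rw [List.getD_eq_getElem xs 0 hilen]
      omega
  | case2 lo hi hlt mid hmidgt ih =>
    intro hlo hhi h1 h2
    have hmid : lo ≤ mid ∧ mid < hi := by constructor <;> (simp only [mid]; omega)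
    apply ih (by omega) (by omega) h1
    intro i hi' hilen
    have hmidlen : mid < xs.length := by omega
    by_cases heq : i = mid
    · subst heq; exact hmidgt
    · have hlt' : mid < i := by omega
      have := (List.pairwise_iff_getElem.mp hs) mid i hmidlen hilen hlt'
      rw [List.getD_eq_getElem xs 0 hilen]
      rw [List.getD_eq_getElem xs 0 hmidlen] at hmidgt
      omega
  | case3 lo hi hge =>
    intro hlo hhi h1 h2
    have : lo = hi := by omega
    subst this
    exact (pvCountP_split xs v lo hhi h1 h2).symm

lemma pvLeCount_sorted (A : List Int) (v : Int) :
    pvLeCount (PySem.List.sorted A (fun x => x)) v = (A.countP (fun x => decide (x ≤ v)) : Int) := by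
  unfold pvLeCount
  have hpw : (PySem.List.sorted A (fun x => x)).Pairwise (· ≤ ·) := by
    simpa using PySem.List.sorted_pairwise A (fun x => x)
  rw [pvLeLoop_correct _ v hpw 0 _ (by omega) le_rfl (by omega) (fun i hi hilen => by omega)]
  rw [(PySem.List.sorted_perm A (fun x => x) false).countP_eq]

-- pvCum of the event stream as four ≤-counts.
lemma pvCum_events (A B : List Int) (r c : Int) :
    pvCum (pvEvents A B r) c =
      (A.countP (fun a => decide (a ≤ c + r)) : Int) - (A.countP (fun a => decide (a ≤ c - r)) : Int)
      - (B.countP (fun b => decide (b ≤ c + r)) : Int) + (B.countP (fun b => decide (b ≤ c - r)) : Int) := by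
  unfold pvEvents pvCum
  rw [List.map_append, List.sum_append]
  have hA : ∀ A' : List Int,
      ((A'.flatMap (fun a => [(a - r, (1 : Int)), (a + r, -1)])).map
        (fun e => if e.1 ≤ c then e.2 else 0)).sum =
      (A'.countP (fun a => decide (a ≤ c + r)) : Int) - (A'.countP (fun a => decide (a ≤ c - r)) : Int) := by
    intro A'
    induction A' with
    | nil => simp
    | cons a t ih =>
      simp only [List.flatMap_cons, List.map_append, List.sum_append, List.map_cons,
        List.map_nil, List.sum_cons, List.sum_nil, List.countP_cons, ih]
      have e1 : (a - r ≤ c) ↔ (a ≤ c + r) := by omega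
      have e2 : (a + r ≤ c) ↔ (a ≤ c - r) := by omega
      by_cases h1 : a ≤ c + r <;> by_cases h2 : a ≤ c - r <;>
        simp [e1, e2, h1, h2] <;> omega
  have hB : ∀ B' : List Int,
      ((B'.flatMap (fun b => [(b - r, (-1 : Int)), (b + r, 1)])).map
        (fun e => if e.1 ≤ c then e.2 else 0)).sum =
      -(B'.countP (fun b => decide (b ≤ c + r)) : Int) + (B'.countP (fun b => decide (b ≤ c - r)) : Int) := by
    intro B'
    induction B' with
    | nil => simp
    | cons b t ih =>
      simp only [List.flatMap_cons, List.map_append, List.sum_append, List.map_cons,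
        List.map_nil, List.sum_cons, List.sum_nil, List.countP_cons, ih]
      have e1 : (b - r ≤ c) ↔ (b ≤ c + r) := by omega
      have e2 : (b + r ≤ c) ↔ (b ≤ c - r) := by omega
      by_cases h1 : b ≤ c + r <;> by_cases h2 : b ≤ c - r <;>
        simp [e1, e2, h1, h2] <;> omega
  rw [hA A, hB B]
  ring

-- The coordinate multiset B builds is exactly the coordinates of the event stream.
lemma pvCoordsM (A B : List Int) (r : Int) :
    (A ++ B).flatMap (fun x => [x - r, x + r]) = (pvEvents A B r).map (·.1) := by
  unfold pvEvents
  rw [List.flatMap_append, List.map_append, List.map_flatMap, List.map_flatMap]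
  rfl

-- ===== VERDICT (by name: the statement is the Claim_ definition above) =====
theorem BINdist_spec : Claim_equal_BINdist := by
  intro A B r _
  unfold Spec_BINdist BINdist BINdist_alt
  by_cases hguard : A.length = 0 ∨ B.length = 0
  · rw [if_pos hguard, if_pos hguard]
  · rw [if_neg hguard, if_neg hguard]
    dsimp only
    rw [pvBuildA A r [], pvBuildB B r, List.nil_append, ← pvLA, pvFoldlA_eq, pvA_eq_canon,
      pvCoordsM A B r, PySem.List.slice_from_one]
    set E := pvEvents A B r with hE
    set cs := PySem.List.sorted (PySem.Set.ofList (E.map (·.1))) (fun c => c) with hcs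
    have hA : ((pvCanon E).foldl pvStep (0, 0, 0)).2.2 = pvSweep E 0 0 cs := by
      rw [pvCanon, ← hcs, pvFoldl_canon_sweep]
      simp
    have hmemcs : ∀ m : Int, m ∈ cs ↔ m ∈ E.map (·.1) := by
      intro m
      rw [hcs, PySem.List.mem_sorted]
      exact PySem.Set.mem_ofList _ _
    have hpw : cs.Pairwise (· < ·) := by
      rw [hcs]
      exact PySem.List.sorted_ofList_pairwise_lt _
    have hsum : pvSweep E 0 0 cs =
        ((cs.zip cs.tail).map (fun q => |pvCum E q.1| * (q.2 - q.1))).sum := by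
      cases hcase : cs with
      | nil => simp [pvSweep]
      | cons c0 t =>
        have hge : ∀ m ∈ cs, c0 ≤ m := by
          rw [hcase] at hpw ⊢
          intro m hm
          rcases List.mem_cons.mp hm with h | h
          · omega
          · have := (List.pairwise_cons.mp hpw).1 m h
            omega
        have h0 : pvCum E (c0 - 1) = 0 := by
          apply pvCum_eq_zero
          intro e he hle
          have := hge e.1 ((hmemcs e.1).mpr (List.mem_map_of_mem he))
          omega
        have hmain := pvSweep_eq_gapsum E cs (c0 - 1) 0 hpw
          (fun m hm => by have := hge m hm; omega)
          (fun e he => Or.inr ((hmemcs e.1).mpr (List.mem_map_of_mem he)))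
        rw [h0, hcase] at hmain
        simpa using hmain
    rw [hA, hsum, PySem.List.foldl_add]
    have hmapeq : (cs.zip cs.tail).map
        (fun p => |pvLeCount (PySem.List.sorted A (fun x => x)) (p.1 + r)
            - pvLeCount (PySem.List.sorted A (fun x => x)) (p.1 - r)
            - pvLeCount (PySem.List.sorted B (fun x => x)) (p.1 + r)
            + pvLeCount (PySem.List.sorted B (fun x => x)) (p.1 - r)| * (p.2 - p.1)) =
        (cs.zip cs.tail).map (fun q => |pvCum E q.1| * (q.2 - q.1)) := by
      apply List.map_congr_left
      intro q _
      rw [pvLeCount_sorted, pvLeCount_sorted, pvLeCount_sorted, pvLeCount_sorted,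
        hE, pvCum_events]
    rw [hmapeq]
    simp
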